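-- pv_equiv track=rewrite | github.com/AgentFlocks/flocks | flocks/browser/helpers.py | _has_return_statement
-- ===== SOURCE A (Python) =====
-- def _has_return_statement(expression: str) -> bool:
--     i = 0
--     state = "code"
--     quote = ""
--     while i < len(expression):
--         ch = expression[i]
--         nxt = expression[i + 1] if i + 1 < len(expression) else ""
--         if state == "code":
--             if ch in ("'", '"', "`"):
--                 state = "string"
--                 quote = ch
--                 i += 1
--                 continue
--             if ch == "/" and nxt == "/":
--                 state = "line_comment"
--                 i += 2
--                 continue
--             if ch == "/" and nxt == "*":
--                 state = "block_comment"
--                 i += 2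
--                 continue
--             if expression.startswith("return", i):
--                 before = expression[i - 1] if i > 0 else ""
--                 after = expression[i + 6] if i + 6 < len(expression) else ""
--                 if not (before == "_" or before.isalnum()) and not (after == "_" or after.isalnum()):
--                     return True
--             i += 1
--             continue
--         if state == "line_comment":
--             if ch == "\n":
--                 state = "code"
--             i += 1
--             continue
--         if state == "block_comment":
--             if ch == "*" and nxt == "/":
--                 state = "code"
--                 i += 2
--                 continue
--             i += 1
--             continue
--         if state == "string":
--             if ch == "\\":
--                 i += 2
--                 continue
--             if ch == quote:
--                 state = "code"
--                 quote = ""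
--             i += 1
--     return False
-- ===== SOURCE B (Python) =====
-- def _is_word(s):
--     return s == "_" or s.isalnum()
--
--
-- def _mask_non_code(expression):
--     """Copy of the source with every character that lies inside a string
--     literal or a comment (delimiters included) replaced by a space."""
--     masked = []
--     i = 0
--     state = "code"
--     quote = ""
--     n = len(expression)
--     while i < n:
--         ch = expression[i]
--         nxt = expression[i + 1] if i + 1 < n else ""
--         if state == "code":
--             if ch in ("'", '"', "`"):
--                 state = "string"
--                 quote = ch
--                 masked.append(" ")
--                 i += 1
--             elif ch == "/" and nxt == "/":
--                 state = "line_comment"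
--                 masked.append("  ")
--                 i += 2
--             elif ch == "/" and nxt == "*":
--                 state = "block_comment"
--                 masked.append("  ")
--                 i += 2
--             else:
--                 masked.append(ch)
--                 i += 1
--         elif state == "line_comment":
--             if ch == "\n":
--                 state = "code"
--             masked.append(" ")
--             i += 1
--         elif state == "block_comment":
--             if ch == "*" and nxt == "/":
--                 state = "code"
--                 masked.append("  ")
--                 i += 2
--             else:
--                 masked.append(" ")
--                 i += 1
--         else:  # string
--             if ch == "\\":
--                 masked.append(" " if i + 1 >= n else "  ")
--                 i += 2
--             else:
--                 if ch == quote: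
--                     state = "code"
--                     quote = ""
--                 masked.append(" ")
--                 i += 1
--     return "".join(masked)
--
--
-- def _has_return_statement(expression: str) -> bool:
--     masked = _mask_non_code(expression)
--     j = 0
--     while j < len(masked):
--         if (masked[j:j + 6] == "return"
--                 and not _is_word(masked[j - 1:j] if j > 0 else "")
--                 and not _is_word(masked[j + 6:j + 7])):
--             return True
--         j += 1
--     return False
-- ===== Notes on version B (the rewrite author's own statement) =====
-- stated objective: alternative
-- what changed: A detects 'return' on the fly inside a single state-machine scan; B decomposes the task into two passes: first build a masked copy of the source with every string-literal/comment character blanked to a space, then search the masked text for 'return' with word-boundary checks.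
import Mathlib
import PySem

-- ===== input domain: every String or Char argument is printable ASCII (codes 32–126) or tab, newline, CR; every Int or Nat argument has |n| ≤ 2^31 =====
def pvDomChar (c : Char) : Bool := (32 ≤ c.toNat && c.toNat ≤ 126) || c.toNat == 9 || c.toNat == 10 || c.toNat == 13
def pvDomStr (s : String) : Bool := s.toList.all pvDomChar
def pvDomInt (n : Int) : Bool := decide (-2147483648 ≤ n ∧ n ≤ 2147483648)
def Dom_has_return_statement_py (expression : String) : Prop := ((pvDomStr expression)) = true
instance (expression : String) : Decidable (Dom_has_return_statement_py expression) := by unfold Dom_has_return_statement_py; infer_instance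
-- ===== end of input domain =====

-- B re-decomposes A's single detect-while-scanning loop into two passes: first mask every
-- string-literal/comment character with a space, then search the masked text for the word
-- "return"; same result, objective: alternative decomposition (no speed claim).

-- scanner state: Python's `state` string together with the `quote` variable
inductive PvSt where
  | code
  | lineC
  | blockC
  | strlit (q : Char)
deriving DecidableEq, Repr

-- Python `s == "_" or s.isalnum()` on a one-char-or-empty lookaround (none = "")
def pvWordOpt (o : Option Char) : Bool :=
  match o with
  | none => false
  | some c => c = '_' || PySem.Chars.isalnum c

def pvReturn : List Char := ['r', 'e', 't', 'u', 'r', 'n']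

-- ===== PORT A =====
-- literal port of A's while loop; `cs[i]? = none` is Python's `i < len(expression)` failing
def pvScanA (cs : List Char) (i : Nat) (st : PvSt) : Bool :=
  match hc : cs[i]? with
  | none => false
  | some ch =>
    match st with
    | PvSt.code =>
      if ch = '\'' ∨ ch = '"' ∨ ch = '`' then pvScanA cs (i + 1) (PvSt.strlit ch)
      else if ch = '/' ∧ cs[i + 1]? = some '/' then pvScanA cs (i + 2) PvSt.lineC
      else if ch = '/' ∧ cs[i + 1]? = some '*' then pvScanA cs (i + 2) PvSt.blockC
      else if (cs.drop i).take 6 = pvReturn then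
        if pvWordOpt (if 0 < i then cs[i - 1]? else none) = false ∧ pvWordOpt cs[i + 6]? = false
        then true
        else pvScanA cs (i + 1) PvSt.code
      else pvScanA cs (i + 1) PvSt.code
    | PvSt.lineC =>
      if ch = '\n' then pvScanA cs (i + 1) PvSt.code else pvScanA cs (i + 1) PvSt.lineC
    | PvSt.blockC =>
      if ch = '*' ∧ cs[i + 1]? = some '/' then pvScanA cs (i + 2) PvSt.code
      else pvScanA cs (i + 1) PvSt.blockC
    | PvSt.strlit q =>
      if ch = '\\' then pvScanA cs (i + 2) (PvSt.strlit q)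
      else if ch = q then pvScanA cs (i + 1) PvSt.code
      else pvScanA cs (i + 1) (PvSt.strlit q)
termination_by cs.length - i
decreasing_by
  all_goals
    (obtain ⟨h, -⟩ := List.getElem?_eq_some_iff.mp hc; omega)

def has_return_statement_py (expression : String) : Bool :=
  pvScanA expression.toList 0 PvSt.code

-- ===== PORT B =====
-- pass 1 of Source B: the masked copy (spaces for string/comment characters) from position i on
def pvMask (cs : List Char) (i : Nat) (st : PvSt) : List Char :=
  match hc : cs[i]? with
  | none => []
  | some ch =>
    match st with
    | PvSt.code =>
      if ch = '\'' ∨ ch = '"' ∨ ch = '`' then ' ' :: pvMask cs (i + 1) (PvSt.strlit ch)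
      else if ch = '/' ∧ cs[i + 1]? = some '/' then ' ' :: ' ' :: pvMask cs (i + 2) PvSt.lineC
      else if ch = '/' ∧ cs[i + 1]? = some '*' then ' ' :: ' ' :: pvMask cs (i + 2) PvSt.blockC
      else ch :: pvMask cs (i + 1) PvSt.code
    | PvSt.lineC =>
      ' ' :: pvMask cs (i + 1) (if ch = '\n' then PvSt.code else PvSt.lineC)
    | PvSt.blockC =>
      if ch = '*' ∧ cs[i + 1]? = some '/' then ' ' :: ' ' :: pvMask cs (i + 2) PvSt.code
      else ' ' :: pvMask cs (i + 1) PvSt.blockC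
    | PvSt.strlit q =>
      if ch = '\\' then
        (if i + 1 ≥ cs.length then [' '] else [' ', ' ']) ++ pvMask cs (i + 2) (PvSt.strlit q)
      else ' ' :: pvMask cs (i + 1) (if ch = q then PvSt.code else PvSt.strlit q)
termination_by cs.length - i
decreasing_by
  all_goals
    (obtain ⟨h, -⟩ := List.getElem?_eq_some_iff.mp hc; omega)

-- pass 2 of Source B: the word-"return" test at position j of the masked text
def pvMatchAt (m : List Char) (j : Nat) : Bool :=
  decide ((m.drop j).take 6 = pvReturn)
    && !pvWordOpt (if 0 < j then m[j - 1]? else none)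
    && !pvWordOpt m[j + 6]?

def pvSearch (m : List Char) (j : Nat) : Bool :=
  if h : j < m.length then
    if pvMatchAt m j then true else pvSearch m (j + 1)
  else false
termination_by m.length - j

def has_return_statement_py_alt (expression : String) : Bool :=
  pvSearch (pvMask expression.toList 0 PvSt.code) 0

-- ===== PRECONDITION & SPEC =====
def Spec_has_return_statement_py (expression : String) (out : Bool) : Prop := out = has_return_statement_py_alt expression
instance (expression : String) (out : Bool) : Decidable (Spec_has_return_statement_py expression out) := by unfold Spec_has_return_statement_py; infer_instance

-- ===== CLAIM (what is proved, stated in full; the proofs are below) =====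
def Claim_equal_has_return_statement_py : Prop := ∀ (expression : String), Dom_has_return_statement_py expression → Spec_has_return_statement_py expression (has_return_statement_py expression)

-- ===== LEMMAS AND PROOFS =====

theorem pvMask_length (cs : List Char) (n : Nat) : ∀ (i : Nat) (st : PvSt), cs.length - i ≤ n →
    (pvMask cs i st).length = cs.length - i := by
  induction n with
  | zero =>
    intro i st h
    rw [pvMask.eq_def]
    cases hc : cs[i]? with
    | none => simp; omega
    | some ch =>
      obtain ⟨hlt, -⟩ := List.getElem?_eq_some_iff.mp hc
      exact absurd hlt (by omega)
  | succ n ih =>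
    intro i st h
    rw [pvMask.eq_def]
    cases hc : cs[i]? with
    | none =>
      have := List.getElem?_eq_none_iff.mp hc
      simp; omega
    | some ch =>
      obtain ⟨hlt, -⟩ := List.getElem?_eq_some_iff.mp hc
      cases st <;> simp only []
      case code =>
        split_ifs with h1 h2 h3
        · simp [ih (i+1) _ (by omega)]; omega
        · obtain ⟨hl2, -⟩ := List.getElem?_eq_some_iff.mp h2.2
          simp [ih (i+2) _ (by omega)]; omega
        · obtain ⟨hl2, -⟩ := List.getElem?_eq_some_iff.mp h3.2
          simp [ih (i+2) _ (by omega)]; omega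
        · simp [ih (i+1) _ (by omega)]; omega
      case lineC => simp [ih (i+1) _ (by omega)]; omega
      case blockC =>
        split_ifs with h1
        · obtain ⟨hl2, -⟩ := List.getElem?_eq_some_iff.mp h1.2
          simp [ih (i+2) _ (by omega)]; omega
        · simp [ih (i+1) _ (by omega)]; omega
      case strlit q =>
        split_ifs <;> simp [ih (i+1) _ (by omega), ih (i+2) _ (by omega)] <;> omega

theorem pvMask_spaceOrSame (cs : List Char) (n : Nat) : ∀ (i : Nat) (st : PvSt) (k : Nat) (c : Char),
    cs.length - i ≤ n → (pvMask cs i st)[k]? = some c → c = ' ' ∨ cs[i + k]? = some c := by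
  induction n with
  | zero =>
    intro i st k c h hg
    rw [pvMask.eq_def] at hg
    cases hc : cs[i]? with
    | none => rw [hc] at hg; simp at hg
    | some ch =>
      obtain ⟨hlt, -⟩ := List.getElem?_eq_some_iff.mp hc
      exact absurd hlt (by omega)
  | succ n ih =>
    intro i st k c h hg
    rw [pvMask.eq_def] at hg
    cases hc : cs[i]? with
    | none => rw [hc] at hg; simp at hg
    | some ch =>
      obtain ⟨hlt, -⟩ := List.getElem?_eq_some_iff.mp hc
      rw [hc] at hg
      cases st <;> simp only [] at hg
      case code =>
        split_ifs at hg with h1 h2 h3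
        · match k, hg with
          | 0, hg => simp at hg; exact Or.inl hg.symm
          | k+1, hg =>
            simp only [List.getElem?_cons_succ] at hg
            simpa [show i + 1 + k = i + (k+1) from by omega] using ih (i+1) _ k c (by omega) hg
        · match k, hg with
          | 0, hg => simp at hg; exact Or.inl hg.symm
          | 1, hg => simp at hg; exact Or.inl hg.symm
          | k+2, hg =>
            simp only [List.getElem?_cons_succ] at hg
            simpa [show i + 2 + k = i + (k+2) from by omega] using ih (i+2) _ k c (by omega) hg
        · match k, hg with
          | 0, hg => simp at hg; exact Or.inl hg.symm
          | 1, hg => simp at hg; exact Or.inl hg.symm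
          | k+2, hg =>
            simp only [List.getElem?_cons_succ] at hg
            simpa [show i + 2 + k = i + (k+2) from by omega] using ih (i+2) _ k c (by omega) hg
        · match k, hg with
          | 0, hg => simp at hg; right; simpa [hc] using hg
          | k+1, hg =>
            simp only [List.getElem?_cons_succ] at hg
            simpa [show i + 1 + k = i + (k+1) from by omega] using ih (i+1) _ k c (by omega) hg
      case lineC =>
        match k, hg with
        | 0, hg => simp at hg; exact Or.inl hg.symm
        | k+1, hg =>
          simp only [List.getElem?_cons_succ] at hg
          simpa [show i + 1 + k = i + (k+1) from by omega] using ih (i+1) _ k c (by omega) hg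
      case blockC =>
        split_ifs at hg with h1
        · match k, hg with
          | 0, hg => simp at hg; exact Or.inl hg.symm
          | 1, hg => simp at hg; exact Or.inl hg.symm
          | k+2, hg =>
            simp only [List.getElem?_cons_succ] at hg
            simpa [show i + 2 + k = i + (k+2) from by omega] using ih (i+2) _ k c (by omega) hg
        · match k, hg with
          | 0, hg => simp at hg; exact Or.inl hg.symm
          | k+1, hg =>
            simp only [List.getElem?_cons_succ] at hg
            simpa [show i + 1 + k = i + (k+1) from by omega] using ih (i+1) _ k c (by omega) hg
      case strlit q =>
        split_ifs at hg with h1 h2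
        · match k, hg with
          | 0, hg => simp at hg; exact Or.inl hg.symm
          | k+1, hg =>
            simp only [List.cons_append, List.nil_append, List.getElem?_cons_succ] at hg
            have hlen := pvMask_length cs cs.length (i+2) (PvSt.strlit q) (by omega)
            rw [List.getElem?_eq_none (by omega)] at hg
            cases hg
        · match k, hg with
          | 0, hg => simp at hg; exact Or.inl hg.symm
          | 1, hg => simp at hg; exact Or.inl hg.symm
          | k+2, hg =>
            simp only [List.cons_append, List.nil_append, List.getElem?_cons_succ] at hg
            simpa [show i + 2 + k = i + (k+2) from by omega] using ih (i+2) _ k c (by omega) hg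
        · match k, hg with
          | 0, hg => simp at hg; exact Or.inl hg.symm
          | k+1, hg =>
            simp only [List.getElem?_cons_succ] at hg
            simpa [show i + 1 + k = i + (k+1) from by omega] using ih (i+1) _ k c (by omega) hg
        · match k, hg with
          | 0, hg => simp at hg; exact Or.inl hg.symm
          | k+1, hg =>
            simp only [List.getElem?_cons_succ] at hg
            simpa [show i + 1 + k = i + (k+1) from by omega] using ih (i+1) _ k c (by omega) hg

theorem pvMask_code_cons (cs : List Char) (i : Nat) (c : Char)
    (hc : cs[i]? = some c)
    (h1 : ¬(c = '\'' ∨ c = '"' ∨ c = '`'))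
    (h2 : ¬(c = '/' ∧ cs[i + 1]? = some '/'))
    (h3 : ¬(c = '/' ∧ cs[i + 1]? = some '*')) :
    pvMask cs i PvSt.code = c :: pvMask cs (i + 1) PvSt.code := by
  rw [pvMask.eq_def, hc]
  simp only [h1, h2, h3, ite_false]

theorem pvMask_head_code (cs : List Char) (i : Nat) :
    pvWordOpt (pvMask cs i PvSt.code)[0]? = pvWordOpt cs[i]? := by
  rw [pvMask.eq_def]
  cases hc : cs[i]? with
  | none => simp
  | some ch =>
    simp only []
    split_ifs with h1 h2 h3
    · rcases h1 with h | h | h <;> subst h <;> simp [pvWordOpt, PySem.Chars.isalnum] <;> decide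
    · obtain ⟨h, -⟩ := h2; subst h; simp [pvWordOpt, PySem.Chars.isalnum]; decide
    · obtain ⟨h, -⟩ := h3; subst h; simp [pvWordOpt, PySem.Chars.isalnum]; decide
    · simp

theorem pvSearch_step (m : List Char) (j : Nat) (h : j < m.length) :
    pvSearch m j = (pvMatchAt m j || pvSearch m (j + 1)) := by
  rw [pvSearch, dif_pos h]
  cases hm : pvMatchAt m j <;> simp

theorem pvSearch_stop (m : List Char) (j : Nat) (h : m.length ≤ j) :
    pvSearch m j = false := by
  rw [pvSearch, dif_neg (by omega)]

theorem pvMatchAt_space (m : List Char) (j : Nat) (h : m[j]? = some ' ') :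
    pvMatchAt m j = false := by
  unfold pvMatchAt
  have hd : (m.drop j)[0]? = some ' ' := by
    rw [List.getElem?_drop]; simpa using h
  have : (m.drop j).take 6 ≠ pvReturn := by
    intro he
    have : ((m.drop j).take 6)[0]? = some 'r' := by rw [he]; rfl
    rw [List.getElem?_take_of_lt (by omega)] at this
    rw [hd] at this
    simp at this
  simp [this]

theorem pvDropCons (cs : List Char) (j : Nat) (c : Char) (h : cs[j]? = some c) :
    cs.drop j = c :: cs.drop (j + 1) := by
  obtain ⟨hlt, rfl⟩ := List.getElem?_eq_some_iff.mp h
  exact List.drop_eq_getElem_cons hlt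

theorem pvDrop6_of (cs : List Char) (i : Nat)
    (h0 : cs[i]? = some 'r') (h1 : cs[i + 1]? = some 'e') (h2 : cs[i + 2]? = some 't')
    (h3 : cs[i + 3]? = some 'u') (h4 : cs[i + 4]? = some 'r') (h5 : cs[i + 5]? = some 'n') :
    cs.drop i = pvReturn ++ cs.drop (i + 6) := by
  rw [pvDropCons cs i 'r' h0, pvDropCons cs (i+1) 'e' h1, pvDropCons cs (i+2) 't' h2,
    pvDropCons cs (i+3) 'u' h3, pvDropCons cs (i+4) 'r' h4, pvDropCons cs (i+5) 'n' h5]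
  rfl

theorem pvTake6_of (cs : List Char) (i : Nat) (h : cs.drop i = pvReturn ++ cs.drop (i + 6)) :
    (cs.drop i).take 6 = pvReturn := by
  rw [h, show (6 : Nat) = pvReturn.length from rfl, List.take_left]

theorem pvChars_of_take6 (l : List Char) (h : l.take 6 = pvReturn) :
    l = pvReturn ++ l.drop 6 := by
  conv_lhs => rw [← List.take_append_drop 6 l]
  rw [h]

theorem pvGetAt (p l : List Char) (i k : Nat) (hp : p.length = i) :
    (p ++ l)[i + k]? = l[k]? := by
  rw [List.getElem?_append_right (by omega)]
  congr 1
  omega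

theorem pvGetBefore (p l : List Char) (i : Nat) (hp : p.length = i) (h0 : 0 < i) :
    (p ++ l)[i - 1]? = p.getLast? := by
  rw [List.getElem?_append_left (by omega), List.getLast?_eq_getElem?, hp]

theorem pvDropAt (p l : List Char) (i : Nat) (hp : p.length = i) : (p ++ l).drop i = l := by
  rw [← hp, List.drop_left]

theorem pvMask_code_cons_letter (cs : List Char) (i : Nat) (c : Char)
    (hc : cs[i]? = some c) (hq : ¬(c = '\'' ∨ c = '"' ∨ c = '`')) (hs : c ≠ '/') :
    pvMask cs i PvSt.code = c :: pvMask cs (i + 1) PvSt.code :=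
  pvMask_code_cons cs i c hc hq (fun hh => hs hh.1) (fun hh => hs hh.1)

theorem pvMain (cs : List Char) (n : Nat) : ∀ (i : Nat) (st : PvSt) (p : List Char),
    cs.length - i ≤ n → p.length = i →
    (st = PvSt.code → pvWordOpt p.getLast? = pvWordOpt (if 0 < i then cs[i - 1]? else none)) →
    (∀ q, st = PvSt.strlit q → q = '\'' ∨ q = '"' ∨ q = '`') →
    pvScanA cs i st = pvSearch (p ++ pvMask cs i st) i := by
  induction n with
  | zero =>
    intro i st p h hp hinv hq
    rw [pvScanA.eq_def]
    cases hc : cs[i]? with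
    | none =>
      rw [pvMask.eq_def, hc]
      simp only [List.append_nil]
      exact (pvSearch_stop p i (by omega)).symm
    | some ch =>
      obtain ⟨hlt, -⟩ := List.getElem?_eq_some_iff.mp hc
      exact absurd hlt (by omega)
  | succ n ih =>
    intro i st p h hp hinv hq
    rw [pvScanA.eq_def]
    cases hc : cs[i]? with
    | none =>
      rw [pvMask.eq_def, hc]
      simp only [List.append_nil]
      have := List.getElem?_eq_none_iff.mp hc
      exact (pvSearch_stop p i (by omega)).symm
    | some ch =>
      obtain ⟨hlt, -⟩ := List.getElem?_eq_some_iff.mp hc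
      cases st <;> simp only []
      case code =>
        by_cases h1 : ch = '\'' ∨ ch = '"' ∨ ch = '`'
        · rw [if_pos h1]
          have hm : pvMask cs i PvSt.code = ' ' :: pvMask cs (i + 1) (PvSt.strlit ch) := by
            rw [pvMask.eq_def, hc]; simp only [if_pos h1]
          rw [hm]
          have hlen := pvMask_length cs cs.length (i + 1) (PvSt.strlit ch) (by omega)
          rw [pvSearch_step _ i (by simp [hlen]; omega),
            pvMatchAt_space _ i (by simpa using pvGetAt p _ i 0 hp), Bool.false_or,
            List.append_cons]
          exact ih (i + 1) _ (p ++ [' ']) (by omega) (by simp [hp]) (by intro hx; cases hx)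
            (by intro q hx; cases hx; exact h1)
        · rw [if_neg h1]
          by_cases h2 : ch = '/' ∧ cs[i + 1]? = some '/'
          · rw [if_pos h2]
            obtain ⟨hl2, -⟩ := List.getElem?_eq_some_iff.mp h2.2
            have hm : pvMask cs i PvSt.code = ' ' :: ' ' :: pvMask cs (i + 2) PvSt.lineC := by
              rw [pvMask.eq_def, hc]; simp only [if_neg h1, if_pos h2]
            rw [hm]
            have hlen := pvMask_length cs cs.length (i + 2) PvSt.lineC (by omega)
            rw [pvSearch_step _ i (by simp [hlen]; omega),
              pvMatchAt_space _ i (by simpa using pvGetAt p _ i 0 hp), Bool.false_or,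
              pvSearch_step _ (i + 1) (by simp [hlen]; omega),
              pvMatchAt_space _ (i + 1) (by simpa using pvGetAt p _ i 1 hp), Bool.false_or,
              show p ++ ' ' :: ' ' :: pvMask cs (i + 2) PvSt.lineC
                  = (p ++ [' ', ' ']) ++ pvMask cs (i + 2) PvSt.lineC by simp]
            exact ih (i + 2) _ (p ++ [' ', ' ']) (by omega) (by simp [hp])
              (by intro hx; cases hx) (by intro q hx; cases hx)
          · rw [if_neg h2]
            by_cases h3 : ch = '/' ∧ cs[i + 1]? = some '*'
            · rw [if_pos h3]
              obtain ⟨hl2, -⟩ := List.getElem?_eq_some_iff.mp h3.2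
              have hm : pvMask cs i PvSt.code = ' ' :: ' ' :: pvMask cs (i + 2) PvSt.blockC := by
                rw [pvMask.eq_def, hc]; simp only [if_neg h1, if_neg h2, if_pos h3]
              rw [hm]
              have hlen := pvMask_length cs cs.length (i + 2) PvSt.blockC (by omega)
              rw [pvSearch_step _ i (by simp [hlen]; omega),
                pvMatchAt_space _ i (by simpa using pvGetAt p _ i 0 hp), Bool.false_or,
                pvSearch_step _ (i + 1) (by simp [hlen]; omega),
                pvMatchAt_space _ (i + 1) (by simpa using pvGetAt p _ i 1 hp), Bool.false_or,
                show p ++ ' ' :: ' ' :: pvMask cs (i + 2) PvSt.blockC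
                    = (p ++ [' ', ' ']) ++ pvMask cs (i + 2) PvSt.blockC by simp]
              exact ih (i + 2) _ (p ++ [' ', ' ']) (by omega) (by simp [hp])
                (by intro hx; cases hx) (by intro q hx; cases hx)
            · rw [if_neg h3]
              by_cases h4 : (cs.drop i).take 6 = pvReturn
              · rw [if_pos h4]
                -- the six characters of "return" in cs
                have hdc : cs.drop i = pvReturn ++ cs.drop (i + 6) := by
                  have := pvChars_of_take6 _ h4
                  rwa [List.drop_drop] at this
                have g0 : cs[i]? = some 'r' := by
                  have : (cs.drop i)[0]? = some 'r' := by rw [hdc]; rfl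
                  rwa [List.getElem?_drop, Nat.add_zero] at this
                have g1 : cs[i + 1]? = some 'e' := by
                  have : (cs.drop i)[1]? = some 'e' := by rw [hdc]; rfl
                  rwa [List.getElem?_drop] at this
                have g2 : cs[i + 2]? = some 't' := by
                  have : (cs.drop i)[2]? = some 't' := by rw [hdc]; rfl
                  rwa [List.getElem?_drop] at this
                have g3 : cs[i + 3]? = some 'u' := by
                  have : (cs.drop i)[3]? = some 'u' := by rw [hdc]; rfl
                  rwa [List.getElem?_drop] at this
                have g4 : cs[i + 4]? = some 'r' := by
                  have : (cs.drop i)[4]? = some 'r' := by rw [hdc]; rfl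
                  rwa [List.getElem?_drop] at this
                have g5 : cs[i + 5]? = some 'n' := by
                  have : (cs.drop i)[5]? = some 'n' := by rw [hdc]; rfl
                  rwa [List.getElem?_drop] at this
                -- unfold the mask over the six letters
                have hm : pvMask cs i PvSt.code
                    = 'r' :: 'e' :: 't' :: 'u' :: 'r' :: 'n' :: pvMask cs (i + 6) PvSt.code := by
                  rw [pvMask_code_cons_letter cs i 'r' g0 (by decide) (by decide),
                    pvMask_code_cons_letter cs (i+1) 'e' g1 (by decide) (by decide),
                    pvMask_code_cons_letter cs (i+2) 't' g2 (by decide) (by decide),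
                    pvMask_code_cons_letter cs (i+3) 'u' g3 (by decide) (by decide),
                    pvMask_code_cons_letter cs (i+4) 'r' g4 (by decide) (by decide),
                    pvMask_code_cons_letter cs (i+5) 'n' g5 (by decide) (by decide)]
                rw [hm]
                have hlen := pvMask_length cs cs.length (i + 6) PvSt.code (by omega)
                -- the three components of pvMatchAt at i
                have htake : ((p ++ 'r' :: 'e' :: 't' :: 'u' :: 'r' :: 'n'
                    :: pvMask cs (i + 6) PvSt.code).drop i).take 6 = pvReturn := by
                  rw [pvDropAt p _ i hp]; rfl
                have hbefore : pvWordOpt (if 0 < i then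
                    (p ++ 'r' :: 'e' :: 't' :: 'u' :: 'r' :: 'n'
                      :: pvMask cs (i + 6) PvSt.code)[i - 1]? else none)
                    = pvWordOpt (if 0 < i then cs[i - 1]? else none) := by
                  by_cases h0 : 0 < i
                  · rw [if_pos h0, if_pos h0, pvGetBefore p _ i hp h0]
                    have := hinv rfl
                    rwa [if_pos h0] at this
                  · rw [if_neg h0, if_neg h0]
                have hafter : pvWordOpt (p ++ 'r' :: 'e' :: 't' :: 'u' :: 'r' :: 'n'
                    :: pvMask cs (i + 6) PvSt.code)[i + 6]?
                    = pvWordOpt cs[i + 6]? := by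
                  rw [pvGetAt p _ i 6 hp]
                  simpa using pvMask_head_code cs (i + 6)
                have hmatch : pvMatchAt (p ++ 'r' :: 'e' :: 't' :: 'u' :: 'r' :: 'n'
                    :: pvMask cs (i + 6) PvSt.code) i
                    = (!pvWordOpt (if 0 < i then cs[i - 1]? else none)
                        && !pvWordOpt cs[i + 6]?) := by
                  rw [pvMatchAt, htake, hbefore, hafter]
                  simp
                by_cases h5 : pvWordOpt (if 0 < i then cs[i - 1]? else none) = false
                    ∧ pvWordOpt cs[i + 6]? = false
                · rw [if_pos h5,
                    pvSearch_step _ i (by simp [hlen]; omega), hmatch, h5.1, h5.2]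
                  simp
                · rw [if_neg h5,
                    pvSearch_step _ i (by simp [hlen]; omega), hmatch]
                  have hmf : (!pvWordOpt (if 0 < i then cs[i - 1]? else none)
                      && !pvWordOpt cs[i + 6]?) = false := by
                    cases hb : pvWordOpt (if 0 < i then cs[i - 1]? else none) <;>
                      cases ha : pvWordOpt cs[i + 6]? <;> simp_all
                  rw [hmf, Bool.false_or,
                    show p ++ 'r' :: 'e' :: 't' :: 'u' :: 'r' :: 'n'
                        :: pvMask cs (i + 6) PvSt.code
                      = (p ++ ['r']) ++ 'e' :: 't' :: 'u' :: 'r' :: 'n'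
                        :: pvMask cs (i + 6) PvSt.code by simp,
                    show ('e' :: 't' :: 'u' :: 'r' :: 'n' :: pvMask cs (i + 6) PvSt.code)
                      = pvMask cs (i + 1) PvSt.code by
                        rw [pvMask_code_cons_letter cs (i+1) 'e' g1 (by decide) (by decide),
                          pvMask_code_cons_letter cs (i+2) 't' g2 (by decide) (by decide),
                          pvMask_code_cons_letter cs (i+3) 'u' g3 (by decide) (by decide),
                          pvMask_code_cons_letter cs (i+4) 'r' g4 (by decide) (by decide),
                          pvMask_code_cons_letter cs (i+5) 'n' g5 (by decide) (by decide)]]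
                  exact ih (i + 1) _ (p ++ ['r']) (by omega) (by simp [hp])
                    (by intro _; rw [List.getLast?_concat]; simp [g0]) (by intro q hx; cases hx)
              · rw [if_neg h4]
                -- ordinary code character: kept in the mask, no match at i
                have hm : pvMask cs i PvSt.code = ch :: pvMask cs (i + 1) PvSt.code :=
                  pvMask_code_cons cs i ch hc h1 h2 h3
                rw [hm]
                have hlen := pvMask_length cs cs.length (i + 1) PvSt.code (by omega)
                have hmf : pvMatchAt (p ++ ch :: pvMask cs (i + 1) PvSt.code) i = false := by
                  rw [pvMatchAt]
                  have hnot : ¬ ((p ++ ch :: pvMask cs (i + 1) PvSt.code).drop i).take 6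
                      = pvReturn := by
                    intro hmm
                    rw [pvDropAt p _ i hp, ← hm] at hmm
                    have hmask := pvChars_of_take6 _ hmm
                    have m0 : (pvMask cs i PvSt.code)[0]? = some 'r' := by
                      rw [hmask]; rfl
                    have m1 : (pvMask cs i PvSt.code)[1]? = some 'e' := by
                      rw [hmask]; rfl
                    have m2 : (pvMask cs i PvSt.code)[2]? = some 't' := by
                      rw [hmask]; rfl
                    have m3 : (pvMask cs i PvSt.code)[3]? = some 'u' := by
                      rw [hmask]; rfl
                    have m4 : (pvMask cs i PvSt.code)[4]? = some 'r' := by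
                      rw [hmask]; rfl
                    have m5 : (pvMask cs i PvSt.code)[5]? = some 'n' := by
                      rw [hmask]; rfl
                    have c0 := (pvMask_spaceOrSame cs cs.length i _ 0 _ (by omega) m0).resolve_left
                      (by decide)
                    have c1 := (pvMask_spaceOrSame cs cs.length i _ 1 _ (by omega) m1).resolve_left
                      (by decide)
                    have c2 := (pvMask_spaceOrSame cs cs.length i _ 2 _ (by omega) m2).resolve_left
                      (by decide)
                    have c3 := (pvMask_spaceOrSame cs cs.length i _ 3 _ (by omega) m3).resolve_left
                      (by decide)
                    have c4 := (pvMask_spaceOrSame cs cs.length i _ 4 _ (by omega) m4).resolve_left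
                      (by decide)
                    have c5 := (pvMask_spaceOrSame cs cs.length i _ 5 _ (by omega) m5).resolve_left
                      (by decide)
                    rw [Nat.add_zero] at c0
                    exact h4 (pvTake6_of cs i (pvDrop6_of cs i c0 c1 c2 c3 c4 c5))
                  simp [hnot]
                rw [pvSearch_step _ i (by simp [hlen]; omega), hmf, Bool.false_or,
                  List.append_cons]
                exact ih (i + 1) _ (p ++ [ch]) (by omega) (by simp [hp])
                  (by intro _; rw [List.getLast?_concat]; simp [hc]) (by intro q hx; cases hx)
      case lineC =>
        have hm : pvMask cs i PvSt.lineC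
            = ' ' :: pvMask cs (i + 1) (if ch = '\n' then PvSt.code else PvSt.lineC) := by
          rw [pvMask.eq_def, hc]
        rw [hm]
        have hlen := pvMask_length cs cs.length (i + 1)
          (if ch = '\n' then PvSt.code else PvSt.lineC) (by omega)
        rw [pvSearch_step _ i (by simp [hlen]; omega),
          pvMatchAt_space _ i (by simpa using pvGetAt p _ i 0 hp), Bool.false_or,
          List.append_cons]
        by_cases h1 : ch = '\n'
        · rw [if_pos h1, if_pos h1]
          refine ih (i + 1) _ (p ++ [' ']) (by omega) (by simp [hp]) ?_ (by intro q hx; cases hx)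
          intro _
          rw [List.getLast?_concat]
          subst h1
          simp only [Nat.add_sub_cancel, Nat.succ_pos, if_pos, hc]
          decide
        · rw [if_neg h1, if_neg h1]
          exact ih (i + 1) _ (p ++ [' ']) (by omega) (by simp [hp]) (by intro hx; cases hx)
            (by intro q hx; cases hx)
      case blockC =>
        by_cases h1 : ch = '*' ∧ cs[i + 1]? = some '/'
        · rw [if_pos h1]
          have hl2 := h1.2
          obtain ⟨hlt2, -⟩ := List.getElem?_eq_some_iff.mp hl2
          have hm : pvMask cs i PvSt.blockC = ' ' :: ' ' :: pvMask cs (i + 2) PvSt.code := by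
            rw [pvMask.eq_def, hc]; simp only [if_pos h1]
          rw [hm]
          have hlen := pvMask_length cs cs.length (i + 2) PvSt.code (by omega)
          rw [pvSearch_step _ i (by simp [hlen]; omega),
            pvMatchAt_space _ i (by simpa using pvGetAt p _ i 0 hp), Bool.false_or,
            pvSearch_step _ (i + 1) (by simp [hlen]; omega),
            pvMatchAt_space _ (i + 1) (by simpa using pvGetAt p _ i 1 hp), Bool.false_or,
            show p ++ ' ' :: ' ' :: pvMask cs (i + 2) PvSt.code
                = (p ++ [' ', ' ']) ++ pvMask cs (i + 2) PvSt.code by simp]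
          refine ih (i + 2) _ (p ++ [' ', ' ']) (by omega) (by simp [hp]) ?_
            (by intro q hx; cases hx)
          intro _
          have hgl : (p ++ [' ', ' ']).getLast? = some ' ' := by simp
          rw [hgl]
          simp only [show i + 2 - 1 = i + 1 from rfl, Nat.succ_pos, if_pos, hl2]
          decide
        · rw [if_neg h1]
          have hm : pvMask cs i PvSt.blockC = ' ' :: pvMask cs (i + 1) PvSt.blockC := by
            rw [pvMask.eq_def, hc]; simp only [if_neg h1]
          rw [hm]
          have hlen := pvMask_length cs cs.length (i + 1) PvSt.blockC (by omega)
          rw [pvSearch_step _ i (by simp [hlen]; omega),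
            pvMatchAt_space _ i (by simpa using pvGetAt p _ i 0 hp), Bool.false_or,
            List.append_cons]
          exact ih (i + 1) _ (p ++ [' ']) (by omega) (by simp [hp]) (by intro hx; cases hx)
            (by intro q hx; cases hx)
      case strlit q =>
        by_cases h1 : ch = '\\'
        · rw [if_pos h1]
          by_cases hge : i + 1 ≥ cs.length
          · -- escape eats the final character: the scan ends
            have hnil : pvMask cs (i + 2) (PvSt.strlit q) = [] := by
              have := pvMask_length cs cs.length (i + 2) (PvSt.strlit q) (by omega)
              exact List.eq_nil_of_length_eq_zero (by omega)
            have hm : pvMask cs i (PvSt.strlit q) = [' '] := by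
              rw [pvMask.eq_def, hc]
              simp only [if_pos h1, if_pos hge, hnil]
              rfl
            rw [hm, pvScanA.eq_def, List.getElem?_eq_none (by omega)]
            rw [pvSearch_step _ i (by simp [hp]),
              pvMatchAt_space _ i (by simpa using pvGetAt p _ i 0 hp), Bool.false_or,
              pvSearch_stop _ (i + 1) (by simp [hp])]
          · have hm : pvMask cs i (PvSt.strlit q)
                = ' ' :: ' ' :: pvMask cs (i + 2) (PvSt.strlit q) := by
              rw [pvMask.eq_def, hc]
              simp only [if_pos h1, if_neg hge]
              rfl
            rw [hm]
            have hlen := pvMask_length cs cs.length (i + 2) (PvSt.strlit q) (by omega)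
            rw [pvSearch_step _ i (by simp [hlen]; omega),
              pvMatchAt_space _ i (by simpa using pvGetAt p _ i 0 hp), Bool.false_or,
              pvSearch_step _ (i + 1) (by simp [hlen]; omega),
              pvMatchAt_space _ (i + 1) (by simpa using pvGetAt p _ i 1 hp), Bool.false_or,
              show p ++ ' ' :: ' ' :: pvMask cs (i + 2) (PvSt.strlit q)
                  = (p ++ [' ', ' ']) ++ pvMask cs (i + 2) (PvSt.strlit q) by simp]
            exact ih (i + 2) _ (p ++ [' ', ' ']) (by omega) (by simp [hp])
              (by intro hx; cases hx) (by intro q' hx; cases hx; exact hq _ rfl)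
        · rw [if_neg h1]
          have hm : pvMask cs i (PvSt.strlit q)
              = ' ' :: pvMask cs (i + 1) (if ch = q then PvSt.code else PvSt.strlit q) := by
            rw [pvMask.eq_def, hc]
            simp only [if_neg h1]
          rw [hm]
          have hlen := pvMask_length cs cs.length (i + 1)
            (if ch = q then PvSt.code else PvSt.strlit q) (by omega)
          rw [pvSearch_step _ i (by simp [hlen]; omega),
            pvMatchAt_space _ i (by simpa using pvGetAt p _ i 0 hp), Bool.false_or,
            List.append_cons]
          by_cases h2 : ch = q
          · rw [if_pos h2, if_pos h2]
            refine ih (i + 1) _ (p ++ [' ']) (by omega) (by simp [hp]) ?_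
              (by intro q' hx; cases hx)
            intro _
            rw [List.getLast?_concat]
            subst h2
            simp only [Nat.add_sub_cancel, Nat.succ_pos, if_pos, hc]
            rcases hq ch rfl with hx | hx | hx <;> subst hx <;> decide
          · rw [if_neg h2, if_neg h2]
            exact ih (i + 1) _ (p ++ [' ']) (by omega) (by simp [hp])
              (by intro hx; cases hx) (by intro q' hx; cases hx; exact hq _ rfl)


-- ===== VERDICT (by name: the statement is the Claim_ definition above) =====
theorem has_return_statement_py_spec : Claim_equal_has_return_statement_py := by
  intro e _
  unfold Spec_has_return_statement_py has_return_statement_py has_return_statement_py_alt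
  have := pvMain e.toList e.toList.length 0 PvSt.code [] (by omega) rfl (by intro _; rfl)
    (by intro q hx; cases hx)
  simpa using this
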